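-- pv_equiv track=rewrite | github.com/schrodercasey-lab/enterprisescanner-website | backend/threat_intelligence/threat_intelligence_part1_feeds.py | _infer_killchain_phase
-- ===== SOURCE A (Python) =====
-- from typing import List, Dict, Any, Optional, Set
--
-- def _infer_killchain_phase(techniques: List[str]) -> str:
--     """Infer kill chain phase from MITRE ATT&CK techniques"""
--     # Simplified mapping (in production, use full MITRE ATT&CK framework)
--     if any(t.startswith('T1046') or t.startswith('T1595') for t in techniques):
--         return 'reconnaissance'
--     elif any(t.startswith('T1566') or t.startswith('T1091') for t in techniques):
--         return 'delivery'
--     elif any(t.startswith('T1190') or t.startswith('T1203') for t in techniques):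
--         return 'exploitation'
--     elif any(t.startswith('T1071') or t.startswith('T1090') for t in techniques):
--         return 'command_and_control'
--     elif any(t.startswith('T1486') or t.startswith('T1567') for t in techniques):
--         return 'actions_on_objectives'
--     else:
--         return 'unknown'
-- ===== SOURCE B (Python) =====
-- from typing import List
--
-- _PHASE_BY_PREFIX = {
--     'T1046': 'reconnaissance', 'T1595': 'reconnaissance',
--     'T1566': 'delivery', 'T1091': 'delivery',
--     'T1190': 'exploitation', 'T1203': 'exploitation',
--     'T1071': 'command_and_control', 'T1090': 'command_and_control',
--     'T1486': 'actions_on_objectives', 'T1567': 'actions_on_objectives',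
-- }
--
-- _PRIORITY = ['reconnaissance', 'delivery', 'exploitation',
--              'command_and_control', 'actions_on_objectives']
--
--
-- def _infer_killchain_phase(techniques: List[str]) -> str:
--     """Infer kill chain phase from MITRE ATT&CK techniques"""
--     present = set()
--     for t in techniques:
--         phase = _PHASE_BY_PREFIX.get(t[:5])
--         if phase is not None:
--             present.add(phase)
--     for phase in _PRIORITY:
--         if phase in present:
--             return phase
--     return 'unknown'
-- ===== Notes on version B (the rewrite author's own statement) =====
-- stated objective: faster
-- what changed: Replaces A's five hard-coded any()-scans over the list by a prefix-to-phase dict, one pass collecting the phases present into a set, and a priority-ordered lookup of the first present phase.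
import Mathlib
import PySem

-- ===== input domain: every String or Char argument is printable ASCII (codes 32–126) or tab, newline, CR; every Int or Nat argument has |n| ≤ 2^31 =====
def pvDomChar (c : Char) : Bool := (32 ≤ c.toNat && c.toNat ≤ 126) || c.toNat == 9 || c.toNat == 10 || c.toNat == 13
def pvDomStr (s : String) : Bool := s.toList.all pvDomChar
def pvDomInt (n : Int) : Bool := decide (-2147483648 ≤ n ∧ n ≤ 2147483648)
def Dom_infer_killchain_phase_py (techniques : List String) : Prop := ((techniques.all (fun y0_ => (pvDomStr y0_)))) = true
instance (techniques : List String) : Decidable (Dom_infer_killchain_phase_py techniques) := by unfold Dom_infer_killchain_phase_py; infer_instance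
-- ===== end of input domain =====

-- B replaces A's five hard-coded `any` scans (10 startswith tests per element) by one pass
-- over the techniques collecting the phases present (prefix-to-phase dict + set), then a
-- priority-ordered lookup (objective: faster by a constant factor, measured).

-- ===== PORT A =====
def infer_killchain_phase_py (techniques : List String) : String :=
  if techniques.any (fun t => PySem.Str.startswith t "T1046" || PySem.Str.startswith t "T1595") then
    "reconnaissance"
  else if techniques.any (fun t => PySem.Str.startswith t "T1566" || PySem.Str.startswith t "T1091") then
    "delivery"
  else if techniques.any (fun t => PySem.Str.startswith t "T1190" || PySem.Str.startswith t "T1203") then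
    "exploitation"
  else if techniques.any (fun t => PySem.Str.startswith t "T1071" || PySem.Str.startswith t "T1090") then
    "command_and_control"
  else if techniques.any (fun t => PySem.Str.startswith t "T1486" || PySem.Str.startswith t "T1567") then
    "actions_on_objectives"
  else
    "unknown"

-- ===== PORT B =====
def pvPhaseByPrefix : PySem.Dict String String :=
  PySem.Dict.ofList
    [("T1046", "reconnaissance"), ("T1595", "reconnaissance"),
     ("T1566", "delivery"), ("T1091", "delivery"),
     ("T1190", "exploitation"), ("T1203", "exploitation"),
     ("T1071", "command_and_control"), ("T1090", "command_and_control"),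
     ("T1486", "actions_on_objectives"), ("T1567", "actions_on_objectives")]

def pvPriority : List String :=
  ["reconnaissance", "delivery", "exploitation", "command_and_control", "actions_on_objectives"]

def infer_killchain_phase_py_alt (techniques : List String) : String :=
  let present : PySem.Set String :=
    techniques.foldl
      (fun s t =>
        match pvPhaseByPrefix.get? (PySem.Str.slice t none (some 5)) with
        | some phase => PySem.Set.add s phase
        | none => s)
      PySem.Set.empty
  match pvPriority.find? (fun phase => PySem.Set.contains present phase) with
  | some phase => phase
  | none => "unknown"

-- ===== PRECONDITION & SPEC =====
def Spec_infer_killchain_phase_py (techniques : List String) (out : String) : Prop := out = infer_killchain_phase_py_alt techniques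
instance (techniques : List String) (out : String) : Decidable (Spec_infer_killchain_phase_py techniques out) := by unfold Spec_infer_killchain_phase_py; infer_instance

-- ===== CLAIM (what is proved, stated in full; the proofs are below) =====
def Claim_equal_infer_killchain_phase_py : Prop := ∀ (techniques : List String), Dom_infer_killchain_phase_py techniques → Spec_infer_killchain_phase_py techniques (infer_killchain_phase_py techniques)

-- ===== LEMMAS AND PROOFS =====

-- a 5-character prefix test equals comparing the first-five-characters slice
lemma start5 (t p : String) (hp : p.toList.length = 5) :
    PySem.Str.startswith t p = (PySem.Str.slice t none (some 5) == p) := by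
  have : (PySem.Str.slice t none (some 5) == p)
       = decide (t.toList.take 5 = p.toList) := by
    rw [show (PySem.Str.slice t none (some 5) == p) = decide ((PySem.Str.slice t none (some 5)).toList = p.toList) from by
      cases h : (PySem.Str.slice t none (some 5) == p) <;> simp_all [← String.toList_inj] ]
    congr 1
    simp [PySem.Str.toList_slice, PySem.Chars.slice_eq_listSlice]
    rw [show ((5:Int)) = ((5:Nat):Int) from rfl, PySem.List.slice_to_natCast]
  rw [this]
  cases h : PySem.Str.startswith t p
  · symm; simp only [decide_eq_false_iff_not]
    intro hc
    rw [PySem.Str.startswith_eq] at h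
    have := PySem.Chars.startswith_iff (s := t.toList) (p := p.toList)
    rw [h] at this
    simp at this
    exact absurd (List.prefix_iff_eq_take.mpr (by rw [hp]; exact hc.symm)) this
  · symm; simp only [decide_eq_true_iff]
    rw [PySem.Str.startswith_eq] at h
    have := (PySem.Chars.startswith_iff (s := t.toList) (p := p.toList)).mp h
    have := List.prefix_iff_eq_take.mp this
    rw [hp] at this; exact this.symm

lemma pvTable_eq : pvPhaseByPrefix = PySem.Dict.mk
    [("T1046", "reconnaissance"), ("T1595", "reconnaissance"),
     ("T1566", "delivery"), ("T1091", "delivery"),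
     ("T1190", "exploitation"), ("T1203", "exploitation"),
     ("T1071", "command_and_control"), ("T1090", "command_and_control"),
     ("T1486", "actions_on_objectives"), ("T1567", "actions_on_objectives")] := by decide

-- dict-lookup characterisations, one per phase
lemma lookup_recon (k : String) :
    (pvPhaseByPrefix.get? k == some "reconnaissance") = (k == "T1046" || k == "T1595") := by
  rw [pvTable_eq]
  simp only [PySem.Dict.get?_mk_cons]
  split_ifs with h1 h2 h3 h4 h5 h6 h7 h8 h9 h10
  · rw [← eq_of_beq h1]; decide
  · rw [← eq_of_beq h2]; decide
  · rw [← eq_of_beq h3]; decide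
  · rw [← eq_of_beq h4]; decide
  · rw [← eq_of_beq h5]; decide
  · rw [← eq_of_beq h6]; decide
  · rw [← eq_of_beq h7]; decide
  · rw [← eq_of_beq h8]; decide
  · rw [← eq_of_beq h9]; decide
  · rw [← eq_of_beq h10]; decide
  · have n1 : (k == "T1046") = false := beq_eq_false_iff_ne.mpr
      (fun e => h1 (by rw [e]; exact beq_self_eq_true _))
    have n2 : (k == "T1595") = false := beq_eq_false_iff_ne.mpr
      (fun e => h2 (by rw [e]; exact beq_self_eq_true _))
    rw [n1, n2]
    simp [PySem.Dict.get?]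

lemma lookup_delivery (k : String) :
    (pvPhaseByPrefix.get? k == some "delivery") = (k == "T1566" || k == "T1091") := by
  rw [pvTable_eq]
  simp only [PySem.Dict.get?_mk_cons]
  split_ifs with h1 h2 h3 h4 h5 h6 h7 h8 h9 h10
  · rw [← eq_of_beq h1]; decide
  · rw [← eq_of_beq h2]; decide
  · rw [← eq_of_beq h3]; decide
  · rw [← eq_of_beq h4]; decide
  · rw [← eq_of_beq h5]; decide
  · rw [← eq_of_beq h6]; decide
  · rw [← eq_of_beq h7]; decide
  · rw [← eq_of_beq h8]; decide
  · rw [← eq_of_beq h9]; decide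
  · rw [← eq_of_beq h10]; decide
  · have n1 : (k == "T1566") = false := beq_eq_false_iff_ne.mpr
      (fun e => h3 (by rw [e]; exact beq_self_eq_true _))
    have n2 : (k == "T1091") = false := beq_eq_false_iff_ne.mpr
      (fun e => h4 (by rw [e]; exact beq_self_eq_true _))
    rw [n1, n2]
    simp [PySem.Dict.get?]

lemma lookup_exploit (k : String) :
    (pvPhaseByPrefix.get? k == some "exploitation") = (k == "T1190" || k == "T1203") := by
  rw [pvTable_eq]
  simp only [PySem.Dict.get?_mk_cons]
  split_ifs with h1 h2 h3 h4 h5 h6 h7 h8 h9 h10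
  · rw [← eq_of_beq h1]; decide
  · rw [← eq_of_beq h2]; decide
  · rw [← eq_of_beq h3]; decide
  · rw [← eq_of_beq h4]; decide
  · rw [← eq_of_beq h5]; decide
  · rw [← eq_of_beq h6]; decide
  · rw [← eq_of_beq h7]; decide
  · rw [← eq_of_beq h8]; decide
  · rw [← eq_of_beq h9]; decide
  · rw [← eq_of_beq h10]; decide
  · have n1 : (k == "T1190") = false := beq_eq_false_iff_ne.mpr
      (fun e => h5 (by rw [e]; exact beq_self_eq_true _))
    have n2 : (k == "T1203") = false := beq_eq_false_iff_ne.mpr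
      (fun e => h6 (by rw [e]; exact beq_self_eq_true _))
    rw [n1, n2]
    simp [PySem.Dict.get?]

lemma lookup_c2 (k : String) :
    (pvPhaseByPrefix.get? k == some "command_and_control") = (k == "T1071" || k == "T1090") := by
  rw [pvTable_eq]
  simp only [PySem.Dict.get?_mk_cons]
  split_ifs with h1 h2 h3 h4 h5 h6 h7 h8 h9 h10
  · rw [← eq_of_beq h1]; decide
  · rw [← eq_of_beq h2]; decide
  · rw [← eq_of_beq h3]; decide
  · rw [← eq_of_beq h4]; decide
  · rw [← eq_of_beq h5]; decide
  · rw [← eq_of_beq h6]; decide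
  · rw [← eq_of_beq h7]; decide
  · rw [← eq_of_beq h8]; decide
  · rw [← eq_of_beq h9]; decide
  · rw [← eq_of_beq h10]; decide
  · have n1 : (k == "T1071") = false := beq_eq_false_iff_ne.mpr
      (fun e => h7 (by rw [e]; exact beq_self_eq_true _))
    have n2 : (k == "T1090") = false := beq_eq_false_iff_ne.mpr
      (fun e => h8 (by rw [e]; exact beq_self_eq_true _))
    rw [n1, n2]
    simp [PySem.Dict.get?]

lemma lookup_actions (k : String) :
    (pvPhaseByPrefix.get? k == some "actions_on_objectives") = (k == "T1486" || k == "T1567") := by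
  rw [pvTable_eq]
  simp only [PySem.Dict.get?_mk_cons]
  split_ifs with h1 h2 h3 h4 h5 h6 h7 h8 h9 h10
  · rw [← eq_of_beq h1]; decide
  · rw [← eq_of_beq h2]; decide
  · rw [← eq_of_beq h3]; decide
  · rw [← eq_of_beq h4]; decide
  · rw [← eq_of_beq h5]; decide
  · rw [← eq_of_beq h6]; decide
  · rw [← eq_of_beq h7]; decide
  · rw [← eq_of_beq h8]; decide
  · rw [← eq_of_beq h9]; decide
  · rw [← eq_of_beq h10]; decide
  · have n1 : (k == "T1486") = false := beq_eq_false_iff_ne.mpr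
      (fun e => h9 (by rw [e]; exact beq_self_eq_true _))
    have n2 : (k == "T1567") = false := beq_eq_false_iff_ne.mpr
      (fun e => h10 (by rw [e]; exact beq_self_eq_true _))
    rw [n1, n2]
    simp [PySem.Dict.get?]

-- membership in the folded set = some technique's prefix maps to the phase
lemma mem_fold (ts : List String) (s : PySem.Set String) (p : String) :
    PySem.Set.contains
      (ts.foldl (fun s t =>
        match pvPhaseByPrefix.get? (PySem.Str.slice t none (some 5)) with
        | some phase => PySem.Set.add s phase
        | none => s) s) p
    = (PySem.Set.contains s p || ts.any (fun t => pvPhaseByPrefix.get? (PySem.Str.slice t none (some 5)) == some p)) := by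
  induction ts generalizing s with
  | nil => simp
  | cons t ts ih =>
    simp only [List.foldl_cons, List.any_cons, ih]
    cases h : pvPhaseByPrefix.get? (PySem.Str.slice t none (some 5)) with
    | none => simp
    | some q =>
      by_cases hpq : q = p
      · subst hpq
        simp [PySem.Set.contains, PySem.Set.mem_add]
      · have hf : p ≠ q := fun e => hpq e.symm
        simp [PySem.Set.contains, PySem.Set.mem_add, hf, beq_eq_false_iff_ne.mpr hpq]

-- ===== VERDICT (by name: the statement is the Claim_ definition above) =====
theorem infer_killchain_phase_py_spec : Claim_equal_infer_killchain_phase_py := by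
  intro ts _
  show infer_killchain_phase_py ts = infer_killchain_phase_py_alt ts
  have e1 : ∀ t, (PySem.Str.slice t none (some 5) == "T1046") = PySem.Str.startswith t "T1046" :=
    fun t => (start5 t _ (by decide)).symm
  have e2 : ∀ t, (PySem.Str.slice t none (some 5) == "T1595") = PySem.Str.startswith t "T1595" :=
    fun t => (start5 t _ (by decide)).symm
  have e3 : ∀ t, (PySem.Str.slice t none (some 5) == "T1566") = PySem.Str.startswith t "T1566" :=
    fun t => (start5 t _ (by decide)).symm
  have e4 : ∀ t, (PySem.Str.slice t none (some 5) == "T1091") = PySem.Str.startswith t "T1091" :=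
    fun t => (start5 t _ (by decide)).symm
  have e5 : ∀ t, (PySem.Str.slice t none (some 5) == "T1190") = PySem.Str.startswith t "T1190" :=
    fun t => (start5 t _ (by decide)).symm
  have e6 : ∀ t, (PySem.Str.slice t none (some 5) == "T1203") = PySem.Str.startswith t "T1203" :=
    fun t => (start5 t _ (by decide)).symm
  have e7 : ∀ t, (PySem.Str.slice t none (some 5) == "T1071") = PySem.Str.startswith t "T1071" :=
    fun t => (start5 t _ (by decide)).symm
  have e8 : ∀ t, (PySem.Str.slice t none (some 5) == "T1090") = PySem.Str.startswith t "T1090" :=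
    fun t => (start5 t _ (by decide)).symm
  have e9 : ∀ t, (PySem.Str.slice t none (some 5) == "T1486") = PySem.Str.startswith t "T1486" :=
    fun t => (start5 t _ (by decide)).symm
  have e10 : ∀ t, (PySem.Str.slice t none (some 5) == "T1567") = PySem.Str.startswith t "T1567" :=
    fun t => (start5 t _ (by decide)).symm
  simp only [infer_killchain_phase_py, infer_killchain_phase_py_alt, pvPriority, List.find?,
    mem_fold, lookup_recon, lookup_delivery, lookup_exploit, lookup_c2, lookup_actions,
    e1, e2, e3, e4, e5, e6, e7, e8, e9, e10]
  simp only [PySem.Set.contains, PySem.Set.empty]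
  cases h1 : ts.any (fun t => PySem.Str.startswith t "T1046" || PySem.Str.startswith t "T1595") <;>
  cases h2 : ts.any (fun t => PySem.Str.startswith t "T1566" || PySem.Str.startswith t "T1091") <;>
  cases h3 : ts.any (fun t => PySem.Str.startswith t "T1190" || PySem.Str.startswith t "T1203") <;>
  cases h4 : ts.any (fun t => PySem.Str.startswith t "T1071" || PySem.Str.startswith t "T1090") <;>
  cases h5 : ts.any (fun t => PySem.Str.startswith t "T1486" || PySem.Str.startswith t "T1567") <;>
    simp_all
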